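-- pv_equiv track=rewrite | github.com/vosslab/emwy | emwy_tools/track_runner/encode_analysis.py | _compute_bad_frame_runs
-- ===== SOURCE A (Python) =====
-- def _compute_bad_frame_runs(bad_flags: list) -> tuple:
-- 	"""Identify consecutive runs of bad frames >= 3 frames long.
--
-- 	Args:
-- 		bad_flags: List of booleans indicating bad frames.
--
-- 	Returns:
-- 		Tuple of (max_run_length, run_count) where run_count is the number
-- 		of consecutive True runs of length >= 3.
-- 	"""
-- 	n = len(bad_flags)
-- 	max_run_length = 0
-- 	run_count = 0
-- 	in_run = False
-- 	current_run_length = 0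
-- 	for i in range(n):
-- 		if bad_flags[i]:
-- 			if not in_run:
-- 				in_run = True
-- 				current_run_length = 1
-- 			else:
-- 				current_run_length += 1
-- 		else:
-- 			if in_run:
-- 				if current_run_length >= 3:
-- 					run_count += 1
-- 					max_run_length = max(max_run_length, current_run_length)
-- 				in_run = False
-- 				current_run_length = 0
-- 	# close final run
-- 	if in_run and current_run_length >= 3:
-- 		run_count += 1
-- 		max_run_length = max(max_run_length, current_run_length)
-- 	return (max_run_length, run_count)
-- ===== SOURCE B (Python) =====
-- def _compute_bad_frame_runs(bad_flags: list) -> tuple: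
-- 	"""Two-phase rewrite: first collect the lengths of all maximal runs of
-- 	consecutive bad frames, then filter/reduce, instead of A's single-pass
-- 	state machine."""
-- 	runs = []
-- 	i = 0
-- 	n = len(bad_flags)
-- 	while i < n:
-- 		if bad_flags[i]:
-- 			j = i + 1
-- 			while j < n and bad_flags[j]:
-- 				j += 1
-- 			runs.append(j - i)
-- 			i = j
-- 		else:
-- 			i += 1
-- 	good = [r for r in runs if r >= 3]
-- 	return (max(good, default=0), len(good))
-- ===== Notes on version B (the rewrite author's own statement) =====
-- stated objective: simpler
-- what changed: Replaced the single-pass in_run/current_run_length state machine with a two-phase decomposition: first collect the lengths of all maximal consecutive True runs, then filter to lengths >= 3 and take max (default 0) and count.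
import Mathlib
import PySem

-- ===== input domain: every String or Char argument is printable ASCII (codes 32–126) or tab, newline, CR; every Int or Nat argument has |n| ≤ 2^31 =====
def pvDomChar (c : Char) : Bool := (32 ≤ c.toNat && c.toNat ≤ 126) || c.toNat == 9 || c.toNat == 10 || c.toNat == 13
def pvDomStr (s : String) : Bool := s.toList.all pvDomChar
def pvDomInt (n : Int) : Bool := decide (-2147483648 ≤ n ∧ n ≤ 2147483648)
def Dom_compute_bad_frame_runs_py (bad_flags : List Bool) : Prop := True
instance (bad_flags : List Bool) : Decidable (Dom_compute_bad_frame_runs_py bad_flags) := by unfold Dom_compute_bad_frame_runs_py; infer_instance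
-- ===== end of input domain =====

-- B replaces A's single-pass in_run state machine by a two-phase decomposition
-- (collect maximal True-run lengths, then filter ≥ 3 and reduce); same behaviour, simpler shape.


-- ===== PORT A =====
-- loop body of A: state (max_run_length, run_count, in_run, current_run_length)
def pvStepA : (Int × Int × Bool × Int) → Bool → (Int × Int × Bool × Int)
  | (m, c, inr, cur), b =>
    if b then
      if ¬ inr then (m, c, true, 1) else (m, c, true, cur + 1)
    else
      if inr then
        (if cur ≥ 3 then (max m cur, c + 1, false, 0) else (m, c, false, 0))
      else (m, c, inr, cur)

def compute_bad_frame_runs_py (bad_flags : List Bool) : Int × Int :=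
  let n : Int := bad_flags.length
  match (PySem.List.pyRange 0 n 1).foldl
      (fun acc i => pvStepA acc (PySem.List.pyGetD bad_flags i false)) (0, 0, false, 0) with
  | (m, c, inr, cur) =>
    -- close final run
    if inr ∧ cur ≥ 3 then (max m cur, c + 1) else (m, c)

-- ===== PORT B =====
-- lengths of the maximal runs of consecutive `true`s (B's outer while loop;
-- the inner while that finds the end of a run is takeWhile/dropWhile)
def pvRunLens : List Bool → List Int
  | [] => []
  | b :: t =>
    if b then (1 + ((t.takeWhile (fun x => x)).length : Int)) :: pvRunLens (t.dropWhile (fun x => x))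
    else pvRunLens t
termination_by l => l.length
decreasing_by
  · exact Nat.lt_succ_of_le (List.length_dropWhile_le _ _)
  · exact Nat.lt_succ_self _

def compute_bad_frame_runs_py_alt (bad_flags : List Bool) : Int × Int :=
  let good := (pvRunLens bad_flags).filter (fun r => 3 ≤ r)
  ((PySem.List.max? good (fun x => x)).getD 0, (good.length : Int))

-- ===== PRECONDITION & SPEC =====
def Spec_compute_bad_frame_runs_py (bad_flags : List Bool) (out : Int × Int) : Prop := out = compute_bad_frame_runs_py_alt bad_flags
instance (bad_flags : List Bool) (out : Int × Int) : Decidable (Spec_compute_bad_frame_runs_py bad_flags out) := by unfold Spec_compute_bad_frame_runs_py; infer_instance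

-- ===== CLAIM (what is proved, stated in full; the proofs are below) =====
def Claim_equal_compute_bad_frame_runs_py : Prop := ∀ (bad_flags : List Bool), Dom_compute_bad_frame_runs_py bad_flags → Spec_compute_bad_frame_runs_py bad_flags (compute_bad_frame_runs_py bad_flags)

-- ===== LEMMAS AND PROOFS =====

-- close the final run (A's epilogue) as a function
def pvFin : (Int × Int × Bool × Int) → Int × Int
  | (m, c, inr, cur) => if inr ∧ cur ≥ 3 then (max m cur, c + 1) else (m, c)

-- run lengths of the remaining list, with `cur` pending bad frames already seen
def pvPend (cur : Int) (l : List Bool) : List Int :=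
  if 0 < cur then (cur + ((l.takeWhile (fun x => x)).length : Int)) :: pvRunLens (l.dropWhile (fun x => x))
  else pvRunLens l

-- A's accumulated (m, c) combined with the outstanding run lengths
def pvComb (m c : Int) (runs : List Int) : Int × Int :=
  let good := runs.filter (fun r => 3 ≤ r)
  (good.foldl max m, c + (good.length : Int))

theorem pvMain (l : List Bool) : ∀ (m c cur : Int), 0 ≤ cur →
    pvFin (l.foldl pvStepA (m, c, decide (0 < cur), cur)) = pvComb m c (pvPend cur l) := by
  induction l with
  | nil =>
    intro m c cur hcur
    by_cases h : 0 < cur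
    · by_cases h3 : 3 ≤ cur <;>
        simp [pvFin, pvComb, pvPend, pvRunLens, h, h3]
    · simp [pvFin, pvComb, pvPend, pvRunLens, h]
  | cons b t ih =>
    intro m c cur hcur
    cases b with
    | true =>
      have hstep : pvStepA (m, c, decide (0 < cur), cur) true = (m, c, true, cur + 1) := by
        by_cases h : 0 < cur
        · simp [pvStepA, h]
        · simp [pvStepA, h]; omega
      have h1 : (true : Bool) = decide ((0:Int) < cur + 1) := by
        simp; omega
      have := ih m c (cur + 1) (by omega)
      rw [List.foldl_cons, hstep, h1, this]
      by_cases h : 0 < cur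
      · simp [pvPend, h, show (0 : Int) < cur + 1 by omega]
        ring_nf
      · have hc0 : cur = 0 := by omega
        subst hc0
        simp [pvPend, pvRunLens]
    | false =>
      by_cases h : 0 < cur
      · by_cases h3 : (3:Int) ≤ cur
        · have hstep : pvStepA (m, c, decide (0 < cur), cur) false = (max m cur, c + 1, false, 0) := by
            simp [pvStepA, h, h3]
          have hf : (false : Bool) = decide ((0:Int) < 0) := by simp
          have := ih (max m cur) (c + 1) 0 le_rfl
          rw [List.foldl_cons, hstep, hf, this]
          simp [pvPend, pvComb, pvRunLens, h, h3, List.foldl_cons]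
          ring
        · have hstep : pvStepA (m, c, decide (0 < cur), cur) false = (m, c, false, 0) := by
            simp [pvStepA, h]
            omega
          have hf : (false : Bool) = decide ((0:Int) < 0) := by simp
          have := ih m c 0 le_rfl
          rw [List.foldl_cons, hstep, hf, this]
          simp [pvPend, pvComb, pvRunLens, h, h3]
      · have hc0 : cur = 0 := by omega
        subst hc0
        have hstep : pvStepA (m, c, decide ((0:Int) < 0), 0) false = (m, c, decide ((0:Int) < 0), 0) := by
          simp [pvStepA]
        have := ih m c 0 le_rfl
        rw [List.foldl_cons, hstep, this]
        simp [pvPend, pvRunLens]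

theorem pvFoldlMaxZero (good : List Int) (hg : ∀ x ∈ good, 3 ≤ x) :
    good.foldl max 0 = (PySem.List.max? good (fun x => x)).getD 0 := by
  cases good with
  | nil => simp [PySem.List.max?]
  | cons x t =>
    rw [PySem.List.max?_id_cons]
    have hx : max 0 x = x := by
      have := hg x (List.mem_cons_self)
      omega
    simp [List.foldl_cons, hx]

-- ===== VERDICT (by name: the statement is the Claim_ definition above) =====
theorem compute_bad_frame_runs_py_spec : Claim_equal_compute_bad_frame_runs_py := by
  intro l _
  show compute_bad_frame_runs_py l = compute_bad_frame_runs_py_alt l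
  have hA : compute_bad_frame_runs_py l =
      pvFin (l.foldl (fun acc b => pvStepA acc b) (0, 0, false, 0)) := by
    show pvFin ((PySem.List.pyRange 0 (l.length : Int) 1).foldl
        (fun acc i => pvStepA acc (PySem.List.pyGetD l i false)) (0, 0, false, 0)) = _
    rw [PySem.List.foldl_pyRange_zero_pyGetD' l false
          (fun acc b => pvStepA acc b) ((0:Int), (0:Int), false, (0:Int))]
  rw [hA]
  rw [show ((0:Int), (0:Int), false, (0:Int)) = ((0:Int), (0:Int), decide ((0:Int) < 0), (0:Int)) by simp]
  rw [pvMain l 0 0 0 le_rfl]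
  unfold pvComb pvPend compute_bad_frame_runs_py_alt
  simp only [if_neg (by omega : ¬ (0:Int) < 0)]
  have := pvFoldlMaxZero ((pvRunLens l).filter (fun r => 3 ≤ r))
    (by intro x hx; simpa using (List.mem_filter.mp hx).2)
  simp [this]
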